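-- pv_equiv track=rewrite | github.com/danagle/advent-of-code | 2018/23/solution.py | part_two
-- ===== SOURCE A (Python) =====
-- from queue import PriorityQueue
--
-- def part_two(bots):
--     count = max_count = max_distance = 0
--     queue = PriorityQueue()
--
--     for x, y, z, radius in bots:
--         distance = abs(x) + abs(y) + abs(z)
--         # Add start of line segment to the queue
--         queue.put((max(0, distance - radius), 1))
--         # Add end of line segment to the queue
--         queue.put((distance + radius + 1, -1))
--
--     while not queue.empty():
--         distance, e = queue.get()
--         count += e
--         if count > max_count:
--             max_distance = distance
--             max_count = count
--
--     return max_distance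
-- ===== SOURCE B (Python) =====
-- def part_two(bots):
--     # Candidate distances are the interval starts; the best point is the start
--     # covered by the most intervals (ends minus starts count), smallest on ties.
--     segs = [(max(0, abs(x) + abs(y) + abs(z) - r), abs(x) + abs(y) + abs(z) + r + 1)
--             for x, y, z, r in bots]
--     best_count = 0
--     best_dist = 0
--     for lo, _ in segs:
--         c = sum(1 for l, _ in segs if l <= lo) - sum(1 for _, h in segs if h <= lo)
--         if c > best_count or (c == best_count and lo < best_dist):
--             best_count, best_dist = c, lo
--     return best_dist
-- ===== Notes on version B (the rewrite author's own statement) =====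
-- stated objective: alternative
-- what changed: Replaced the priority-queue event sweep (sort all 2n endpoint events, run a counter with running max) by a direct quadratic scan: for each interval start s count started-minus-ended intervals at s and keep the maximum count, smallest s on ties.
import Mathlib
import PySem

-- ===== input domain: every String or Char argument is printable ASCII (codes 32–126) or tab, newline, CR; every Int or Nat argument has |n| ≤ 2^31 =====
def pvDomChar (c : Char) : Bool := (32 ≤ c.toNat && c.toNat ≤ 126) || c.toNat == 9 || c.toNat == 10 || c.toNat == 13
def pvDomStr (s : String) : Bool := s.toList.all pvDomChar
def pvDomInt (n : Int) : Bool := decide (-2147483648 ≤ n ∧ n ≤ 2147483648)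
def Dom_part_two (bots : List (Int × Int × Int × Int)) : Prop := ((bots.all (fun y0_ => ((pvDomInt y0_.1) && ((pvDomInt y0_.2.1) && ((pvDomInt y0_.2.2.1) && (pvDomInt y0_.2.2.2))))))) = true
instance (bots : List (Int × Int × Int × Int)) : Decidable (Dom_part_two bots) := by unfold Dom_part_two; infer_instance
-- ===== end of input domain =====

-- B replaces A's sorted event sweep by a quadratic coverage count over interval starts;
-- same result on every input (alternative decomposition, not claimed faster).

-- ===== PORT A =====
-- the while-loop popping the priority queue: the queue yields its (distance, e)
-- pairs in ascending lexicographic (Python tuple) order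
def pvSweep : Int → Int → Int → List (Int × Int) → Int
  | _, _, maxd, [] => maxd
  | count, maxc, maxd, ev :: rest =>
    let c := count + ev.2
    if c > maxc then pvSweep c c ev.1 rest else pvSweep c maxc maxd rest

-- the for-loop filling the queue with the two events per bot
def pvEventsA (bots : List (Int × Int × Int × Int)) : List (Int × Int) :=
  bots.foldl (fun q b =>
    q ++ [(max 0 ((|b.1| + |b.2.1| + |b.2.2.1|) - b.2.2.2), 1),
          ((|b.1| + |b.2.1| + |b.2.2.1|) + b.2.2.2 + 1, -1)]) []

def part_two (bots : List (Int × Int × Int × Int)) : Int :=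
  pvSweep 0 0 0 (PySem.List.sorted2 (pvEventsA bots) (fun p => p.1) (fun p => p.2))

-- ===== PORT B =====
def part_two_alt (bots : List (Int × Int × Int × Int)) : Int :=
  let segs := bots.map (fun b =>
    (max 0 ((|b.1| + |b.2.1| + |b.2.2.1|) - b.2.2.2),
     (|b.1| + |b.2.1| + |b.2.2.1|) + b.2.2.2 + 1))
  let r := segs.foldl (fun (st : Int × Int) p =>
    let c : Int := (segs.foldl (fun a q => if q.1 ≤ p.1 then a + 1 else a) (0 : Int))
           - (segs.foldl (fun a q => if q.2 ≤ p.1 then a + 1 else a) (0 : Int))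
    if c > st.1 ∨ (c = st.1 ∧ p.1 < st.2) then (c, p.1) else st) ((0 : Int), (0 : Int))
  r.2

-- ===== PRECONDITION & SPEC =====
def Spec_part_two (bots : List (Int × Int × Int × Int)) (out : Int) : Prop := out = part_two_alt bots
instance (bots : List (Int × Int × Int × Int)) (out : Int) : Decidable (Spec_part_two bots out) := by unfold Spec_part_two; infer_instance

-- ===== CLAIM (what is proved, stated in full; the proofs are below) =====
def Claim_equal_part_two : Prop := ∀ (bots : List (Int × Int × Int × Int)), Dom_part_two bots → Spec_part_two bots (part_two bots)

-- ===== LEMMAS AND PROOFS =====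

-- abbreviations for the interval endpoints both programs compute per bot
def pvLo (b : Int × Int × Int × Int) : Int := max 0 ((|b.1| + |b.2.1| + |b.2.2.1|) - b.2.2.2)
def pvHi (b : Int × Int × Int × Int) : Int := (|b.1| + |b.2.1| + |b.2.2.1|) + b.2.2.2 + 1
def pvSegs (bots : List (Int × Int × Int × Int)) : List (Int × Int) := bots.map (fun b => (pvLo b, pvHi b))
def pvEv (bots : List (Int × Int × Int × Int)) : List (Int × Int) := bots.flatMap (fun b => [(pvLo b, 1), (pvHi b, -1)])

-- signed sum of event deltas at keys ≤ p, and B's signed coverage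
def pvEvsum (es : List (Int × Int)) (p : Int) : Int := (es.map (fun ev => if ev.1 ≤ p then ev.2 else 0)).sum
def pvScov (S : List (Int × Int)) (p : Int) : Int := (S.map (fun q => (if q.1 ≤ p then (1 : Int) else 0) - (if q.2 ≤ p then 1 else 0))).sum

-- max over nonempty prefix sums of the event deltas, starting from c
def pvMne : Int → List (Int × Int) → Option Int
  | _, [] => none
  | c, ev :: t => some (max (c + ev.2) ((pvMne (c + ev.2) t).getD (c + ev.2)))

-- key of the first event at which the running sum from c hits m
def pvFk : Int → Int → List (Int × Int) → Int
  | _, _, [] => 0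
  | c, m, ev :: t => if c + ev.2 = m then ev.1 else pvFk (c + ev.2) m t

-- lexicographic ≤ on events, and the comparison sorted2 uses
def pvPL (a b : Int × Int) : Prop := a.1 < b.1 ∨ (a.1 = b.1 ∧ a.2 ≤ b.2)
def pvLt (a b : Int × Int) : Bool := decide (a.1 < b.1) || (!decide (b.1 < a.1) && decide (a.2 < b.2))

-- B's fold step with the inner coverage count abstracted to pvScov
def pvStep (S : List (Int × Int)) (st : Int × Int) (p : Int × Int) : Int × Int :=
  let c := pvScov S p.1
  if c > st.1 ∨ (c = st.1 ∧ p.1 < st.2) then (c, p.1) else st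

lemma pvPL_fst_le {a b : Int × Int} (h : pvPL a b) : a.1 ≤ b.1 := by
  rcases h with h | ⟨h, _⟩ <;> omega

lemma pvLt_true {a b : Int × Int} (h : pvLt a b = true) : pvPL a b := by
  simp [pvLt] at h; unfold pvPL; omega

lemma pvLt_false {a b : Int × Int} (h : pvLt a b = false) : pvPL b a := by
  simp [pvLt] at h; unfold pvPL; omega

lemma pvPL_trans {a b c : Int × Int} (h1 : pvPL a b) (h2 : pvPL b c) : pvPL a c := by
  unfold pvPL at *; omega

lemma pvInsert_pairwise (x : Int × Int) :
    ∀ ys : List (Int × Int), ys.Pairwise pvPL → (PySem.List.insertBy pvLt x ys).Pairwise pvPL := by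
  intro ys
  induction ys with
  | nil => intro _; simp [PySem.List.insertBy]
  | cons y t ih =>
    intro hp
    rw [List.pairwise_cons] at hp
    obtain ⟨hy, ht⟩ := hp
    show (if pvLt x y then x :: y :: t else y :: PySem.List.insertBy pvLt x t).Pairwise pvPL
    by_cases h : pvLt x y = true
    · simp only [h, if_true]
      refine List.Pairwise.cons ?_ (List.Pairwise.cons hy ht)
      intro z hz
      rcases List.mem_cons.mp hz with rfl | hz
      · exact pvLt_true h
      · exact pvPL_trans (pvLt_true h) (hy z hz)
    · rw [Bool.not_eq_true] at h
      simp only [h, Bool.false_eq_true, if_false]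
      refine List.Pairwise.cons ?_ (ih ht)
      intro z hz
      rcases (PySem.List.mem_insertBy pvLt x z t).mp hz with rfl | hz
      · exact pvLt_false h
      · exact hy z hz

lemma pvFoldl_insert_pairwise :
    ∀ (xs acc : List (Int × Int)), acc.Pairwise pvPL →
      (xs.foldl (fun acc x => PySem.List.insertBy pvLt x acc) acc).Pairwise pvPL := by
  intro xs
  induction xs with
  | nil => intro acc h; simpa using h
  | cons x t ih => intro acc h; exact ih _ (pvInsert_pairwise x acc h)

lemma pvSorted_pairwise (xs : List (Int × Int)) :
    (PySem.List.sorted2 xs (fun p => p.1) (fun p => p.2)).Pairwise pvPL := by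
  show (xs.foldl (fun acc x => PySem.List.insertBy pvLt x acc) []).Pairwise pvPL
  exact pvFoldl_insert_pairwise xs [] List.Pairwise.nil

-- closed form of A's sweep loop
lemma pvSweep_eq : ∀ (es : List (Int × Int)) (c mc md : Int),
    pvSweep c mc md es =
      match pvMne c es with
      | none => md
      | some m => if m > mc then pvFk c m es else md := by
  intro es
  induction es with
  | nil => intro c mc md; simp [pvSweep, pvMne]
  | cons ev t ih =>
    intro c mc md
    show (if c + ev.2 > mc then pvSweep (c + ev.2) (c + ev.2) ev.1 t
          else pvSweep (c + ev.2) mc md t) = _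
    rw [ih, ih]
    cases h : pvMne (c + ev.2) t with
    | none =>
      simp only [pvMne, pvFk, h, Option.getD_none]
      split_ifs <;> first | rfl | omega
    | some m' =>
      simp only [pvMne, pvFk, h, Option.getD_some]
      by_cases hmx : m' ≤ c + ev.2
      · rw [max_eq_left hmx]
        split_ifs <;> first | rfl | omega
      · rw [max_eq_right (by omega : c + ev.2 ≤ m')]
        split_ifs <;> first | rfl | omega

lemma pvEvsum_cons (ev : Int × Int) (t : List (Int × Int)) (p : Int) :
    pvEvsum (ev :: t) p = (if ev.1 ≤ p then ev.2 else 0) + pvEvsum t p := by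
  simp [pvEvsum]

lemma pvEvsum_zero_of (t : List (Int × Int)) (p : Int) (h : ∀ ev ∈ t, ¬ ev.1 ≤ p) :
    pvEvsum t p = 0 := by
  induction t with
  | nil => simp [pvEvsum]
  | cons ev t ih =>
    rw [pvEvsum_cons, ih (fun e he => h e (List.mem_cons_of_mem _ he))]
    simp [h ev (List.mem_cons_self)]

lemma pvEvsum_nonneg_of (t : List (Int × Int)) (p : Int) (h : ∀ ev ∈ t, ev.1 ≤ p → 0 ≤ ev.2) :
    0 ≤ pvEvsum t p := by
  induction t with
  | nil => simp [pvEvsum]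
  | cons ev t ih =>
    rw [pvEvsum_cons]
    have h1 := h ev List.mem_cons_self
    have h2 := ih (fun e he hle => h e (List.mem_cons_of_mem _ he) hle)
    by_cases hle : ev.1 ≤ p
    · have := h1 hle; simp [hle]; omega
    · simp [hle]; omega

-- P1: every "sum of events with key ≤ p" is a prefix sum, hence ≤ the running max
lemma pvMne_ge_evsum : ∀ (es : List (Int × Int)) (c m p : Int),
    es.Pairwise pvPL → pvMne c es = some m → (∃ ev ∈ es, ev.1 ≤ p) →
    c + pvEvsum es p ≤ m := by
  intro es
  induction es with
  | nil => intro c m p _ hm; simp [pvMne] at hm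
  | cons ev t ih =>
    intro c m p hpw hm hex
    rw [List.pairwise_cons] at hpw
    obtain ⟨hhead, hpt⟩ := hpw
    have hm' : max (c + ev.2) ((pvMne (c + ev.2) t).getD (c + ev.2)) = m := by
      simpa [pvMne] using hm
    by_cases hs : ev.1 ≤ p
    · rw [pvEvsum_cons]
      by_cases hext : ∃ e' ∈ t, e'.1 ≤ p
      · obtain ⟨e', he', _⟩ := hext
        have hne : ∃ m'', pvMne (c + ev.2) t = some m'' := by
          cases t with
          | nil => exact absurd he' (List.not_mem_nil)
          | cons a t' => exact ⟨_, rfl⟩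
        obtain ⟨m'', hm''⟩ := hne
        have hih := ih (c + ev.2) m'' p hpt hm'' ⟨e', he', by assumption⟩
        rw [hm''] at hm'
        simp only [Option.getD_some] at hm'
        simp [hs]; omega
      · rw [pvEvsum_zero_of t p (fun e he hle => hext ⟨e, he, hle⟩)]
        have : c + ev.2 ≤ m := by
          rw [← hm']; exact le_max_left _ _
        simp [hs]; omega
    · exfalso
      obtain ⟨e', he', hle⟩ := hex
      rcases List.mem_cons.mp he' with rfl | hmem
      · exact hs hle
      · exact hs (le_trans (pvPL_fst_le (hhead e' hmem)) hle)

-- P2: the key pvFk returns is a start event at which the coverage equals the max,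
-- and it is the least key (with any event ≤ it) at which that happens
lemma pvFk_spec : ∀ (es : List (Int × Int)) (c m : Int),
    es.Pairwise pvPL → (∀ ev ∈ es, ev.2 = 1 ∨ ev.2 = -1) →
    pvMne c es = some m → c < m →
    ((pvFk c m es, 1) ∈ es ∧ c + pvEvsum es (pvFk c m es) = m ∧
      ∀ p, (∃ ev ∈ es, ev.1 ≤ p) → c + pvEvsum es p = m → pvFk c m es ≤ p) := by
  intro es
  induction es with
  | nil => intro c m _ _ hm; simp [pvMne] at hm
  | cons ev t ih =>
    intro c m hpw hpm hm hcm
    have hpw' := hpw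
    rw [List.pairwise_cons] at hpw'
    obtain ⟨hhead, hpt⟩ := hpw'
    have hm' : max (c + ev.2) ((pvMne (c + ev.2) t).getD (c + ev.2)) = m := by
      simpa [pvMne] using hm
    by_cases hce : c + ev.2 = m
    · -- the head event itself reaches m: it must be a start, and no later event has key ≤ ev.1
      have he1 : ev.2 = 1 := by
        rcases hpm ev List.mem_cons_self with h | h <;> omega
      have hfk : pvFk c m (ev :: t) = ev.1 := by simp [pvFk, hce]
      have hub : c + pvEvsum (ev :: t) ev.1 ≤ m :=
        pvMne_ge_evsum (ev :: t) c m ev.1 hpw hm ⟨ev, List.mem_cons_self, le_refl _⟩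
      have hlb : 0 ≤ pvEvsum t ev.1 := by
        apply pvEvsum_nonneg_of
        intro e' he' hle
        have hpl := hhead e' he'
        rcases hpl with h | ⟨h1, h2⟩
        · omega
        · omega
      rw [pvEvsum_cons] at hub
      refine ⟨?_, ?_, ?_⟩
      · rw [hfk]
        have : ev = (ev.1, 1) := by
          cases ev with | mk a b => simp at he1 ⊢; exact he1
        rw [← this]; exact List.mem_cons_self
      · rw [hfk, pvEvsum_cons]
        simp only [le_refl, if_true] at hub ⊢
        omega
      · intro p hex _
        rw [hfk]
        obtain ⟨e', he', hle⟩ := hex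
        rcases List.mem_cons.mp he' with rfl | hmem
        · exact hle
        · exact le_trans (pvPL_fst_le (hhead e' hmem)) hle
    · -- the max is reached inside the tail
      have htne : t ≠ [] := by
        intro h; subst h
        simp [pvMne] at hm'
        omega
      have hmt : pvMne (c + ev.2) t = some m ∧ c + ev.2 < m := by
        cases t with
        | nil => exact absurd rfl htne
        | cons a t' =>
          have hsome : ∃ m0, pvMne (c + ev.2) (a :: t') = some m0 := ⟨_, rfl⟩
          obtain ⟨m0, hm0⟩ := hsome
          rw [hm0] at hm'
          simp only [Option.getD_some] at hm'
          constructor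
          · rw [hm0]; congr 1; omega
          · omega
      obtain ⟨hmt, hlt⟩ := hmt
      obtain ⟨ihmem, ihsum, ihmin⟩ :=
        ih (c + ev.2) m hpt (fun e' h => hpm e' (List.mem_cons_of_mem _ h)) hmt hlt
      have hfk : pvFk c m (ev :: t) = pvFk (c + ev.2) m t := by simp [pvFk, hce]
      refine ⟨?_, ?_, ?_⟩
      · rw [hfk]; exact List.mem_cons_of_mem _ ihmem
      · rw [hfk, pvEvsum_cons]
        have hsle : ev.1 ≤ pvFk (c + ev.2) m t := pvPL_fst_le (hhead _ ihmem)
        simp only [hsle, if_true]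
        omega
      · intro p hex hsum
        rw [hfk]
        by_cases hext : ∃ e' ∈ t, e'.1 ≤ p
        · apply ihmin p hext
          obtain ⟨e', he', hle⟩ := hext
          have hsp : ev.1 ≤ p := le_trans (pvPL_fst_le (hhead e' he')) hle
          rw [pvEvsum_cons] at hsum
          simp only [hsp, if_true] at hsum
          omega
        · have hz : ∀ e' ∈ t, ¬ e'.1 ≤ p := fun e' he' hle => hext ⟨e', he', hle⟩
          exfalso
          obtain ⟨e', he', hle⟩ := hex
          rcases List.mem_cons.mp he' with rfl | hmem
          · rw [pvEvsum_cons, pvEvsum_zero_of t p hz] at hsum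
            simp only [hle, if_true] at hsum
            omega
          · exact hz e' hmem hle

-- the event queue A builds, as a flat map
lemma pvEventsA_flat : ∀ (bots : List (Int × Int × Int × Int)) (acc : List (Int × Int)),
    List.foldl (fun q b =>
      q ++ [(max 0 ((|b.1| + |b.2.1| + |b.2.2.1|) - b.2.2.2), 1),
            ((|b.1| + |b.2.1| + |b.2.2.1|) + b.2.2.2 + 1, -1)]) acc bots
    = acc ++ pvEv bots := by
  intro bots
  induction bots with
  | nil => intro acc; simp [pvEv]
  | cons b bs ih =>
    intro acc
    simp only [List.foldl_cons, ih, pvEv, List.flatMap_cons, pvLo, pvHi, List.append_assoc]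

lemma pvEventsA_eq (bots : List (Int × Int × Int × Int)) : pvEventsA bots = pvEv bots := by
  unfold pvEventsA
  rw [pvEventsA_flat]
  simp

lemma pvEvsum_perm {es₁ es₂ : List (Int × Int)} (h : es₁.Perm es₂) (p : Int) :
    pvEvsum es₁ p = pvEvsum es₂ p :=
  List.Perm.sum_eq (h.map _)

lemma pvEv_cons (b : Int × Int × Int × Int) (bs : List (Int × Int × Int × Int)) :
    pvEv (b :: bs) = (pvLo b, 1) :: (pvHi b, -1) :: pvEv bs := by
  simp [pvEv]

lemma pvSegs_cons (b : Int × Int × Int × Int) (bs : List (Int × Int × Int × Int)) :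
    pvSegs (b :: bs) = (pvLo b, pvHi b) :: pvSegs bs := rfl

lemma pvScov_cons (q : Int × Int) (L : List (Int × Int)) (p : Int) :
    pvScov (q :: L) p = ((if q.1 ≤ p then (1 : Int) else 0) - (if q.2 ≤ p then 1 else 0)) + pvScov L p := by
  simp [pvScov]

lemma pvEvsum_ev_scov : ∀ (bots : List (Int × Int × Int × Int)) (p : Int),
    pvEvsum (pvEv bots) p = pvScov (pvSegs bots) p := by
  intro bots p
  induction bots with
  | nil => simp [pvEv, pvSegs, pvEvsum, pvScov]
  | cons b bs ih =>
    rw [pvEv_cons, pvEvsum_cons, pvEvsum_cons, pvSegs_cons, pvScov_cons, ih]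
    simp only []
    split_ifs <;> omega

lemma pvMem_ev_one (bots : List (Int × Int × Int × Int)) (s : Int) :
    ((s, (1 : Int)) ∈ pvEv bots) ↔ ∃ q ∈ pvSegs bots, q.1 = s := by
  simp only [pvEv, List.mem_flatMap, pvSegs, List.mem_map]
  constructor
  · rintro ⟨b, hb, hmem⟩
    rcases List.mem_cons.mp hmem with heq | hmem'
    · have h1 : s = pvLo b := congrArg Prod.fst heq
      exact ⟨(pvLo b, pvHi b), ⟨b, hb, rfl⟩, h1.symm⟩
    · rcases List.mem_cons.mp hmem' with heq | hmem''
      · exfalso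
        have h2 : (1 : Int) = -1 := congrArg Prod.snd heq
        omega
      · exact absurd hmem'' (List.not_mem_nil)
  · rintro ⟨q, ⟨b, hb, rfl⟩, hq⟩
    refine ⟨b, hb, ?_⟩
    have : (s, (1 : Int)) = (pvLo b, 1) := by
      have h1 : s = pvLo b := hq.symm
      rw [h1]
    rw [this]
    exact List.mem_cons_self

lemma pvEv_pm (bots : List (Int × Int × Int × Int)) :
    ∀ ev ∈ pvEv bots, ev.2 = 1 ∨ ev.2 = -1 := by
  intro ev hev
  simp only [pvEv, List.mem_flatMap] at hev
  obtain ⟨b, _, hmem⟩ := hev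
  rcases List.mem_cons.mp hmem with rfl | hmem'
  · left; rfl
  · rcases List.mem_cons.mp hmem' with rfl | hmem''
    · right; rfl
    · exact absurd hmem'' (List.not_mem_nil)

lemma pvSegs_lo_nonneg (bots : List (Int × Int × Int × Int)) :
    ∀ q ∈ pvSegs bots, 0 ≤ q.1 := by
  intro q hq
  simp only [pvSegs, List.mem_map] at hq
  obtain ⟨b, _, rfl⟩ := hq
  exact le_max_left _ _

-- B's inner counting folds compute pvScov
lemma pvFoldl_count_fst : ∀ (L : List (Int × Int)) (p a : Int),
    L.foldl (fun a q => if q.1 ≤ p then a + 1 else a) a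
      = a + (L.map (fun q => if q.1 ≤ p then (1 : Int) else 0)).sum := by
  intro L
  induction L with
  | nil => intro p a; simp
  | cons q L ih =>
    intro p a
    simp only [List.foldl_cons, List.map_cons, List.sum_cons]
    by_cases h : q.1 ≤ p
    · simp only [h, if_true]; rw [ih]; ring
    · simp only [h, if_false]; rw [ih]; ring

lemma pvFoldl_count_snd : ∀ (L : List (Int × Int)) (p a : Int),
    L.foldl (fun a q => if q.2 ≤ p then a + 1 else a) a
      = a + (L.map (fun q => if q.2 ≤ p then (1 : Int) else 0)).sum := by
  intro L
  induction L with
  | nil => intro p a; simp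
  | cons q L ih =>
    intro p a
    simp only [List.foldl_cons, List.map_cons, List.sum_cons]
    by_cases h : q.2 ≤ p
    · simp only [h, if_true]; rw [ih]; ring
    · simp only [h, if_false]; rw [ih]; ring

lemma pvScov_split (L : List (Int × Int)) (p : Int) :
    pvScov L p = (L.map (fun q => if q.1 ≤ p then (1 : Int) else 0)).sum
               - (L.map (fun q => if q.2 ≤ p then (1 : Int) else 0)).sum := by
  induction L with
  | nil => simp [pvScov]
  | cons q L ih =>
    simp only [pvScov, List.map_cons, List.sum_cons] at *
    omega

lemma pvAlt_eq (bots : List (Int × Int × Int × Int)) :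
    part_two_alt bots = ((pvSegs bots).foldl (pvStep (pvSegs bots)) (0, 0)).2 := by
  have hfun : (fun (st : Int × Int) (p : Int × Int) =>
      let c : Int := ((pvSegs bots).foldl (fun a q => if q.1 ≤ p.1 then a + 1 else a) (0 : Int))
             - ((pvSegs bots).foldl (fun a q => if q.2 ≤ p.1 then a + 1 else a) (0 : Int))
      if c > st.1 ∨ (c = st.1 ∧ p.1 < st.2) then (c, p.1) else st)
      = pvStep (pvSegs bots) := by
    funext st p
    show (let c : Int := _; if c > st.1 ∨ (c = st.1 ∧ p.1 < st.2) then (c, p.1) else st) = _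
    rw [show (((pvSegs bots).foldl (fun a q => if q.1 ≤ p.1 then a + 1 else a) (0 : Int))
           - ((pvSegs bots).foldl (fun a q => if q.2 ≤ p.1 then a + 1 else a) (0 : Int)))
         = pvScov (pvSegs bots) p.1 by
      rw [pvFoldl_count_fst, pvFoldl_count_snd, pvScov_split]; ring]
    rfl
  show (((pvSegs bots).foldl (fun (st : Int × Int) (p : Int × Int) =>
      let c : Int := ((pvSegs bots).foldl (fun a q => if q.1 ≤ p.1 then a + 1 else a) (0 : Int))
             - ((pvSegs bots).foldl (fun a q => if q.2 ≤ p.1 then a + 1 else a) (0 : Int))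
      if c > st.1 ∨ (c = st.1 ∧ p.1 < st.2) then (c, p.1) else st) ((0 : Int), (0 : Int))).2) = _
  rw [hfun]

-- once the maximum m has been stored, the second component only ever decreases to s'
lemma pvFoldB_min (S : List (Int × Int)) (m s' : Int)
    (Hle : ∀ q ∈ S, pvScov S q.1 ≤ m) :
    ∀ (T : List (Int × Int)) (bd : Int), (∀ q ∈ T, q ∈ S) →
      (∀ q ∈ T, pvScov S q.1 = m → s' ≤ q.1) → s' ≤ bd →
      (bd = s' ∨ ∃ q ∈ T, pvScov S q.1 = m ∧ q.1 = s') →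
      (T.foldl (pvStep S) (m, bd)).2 = s' := by
  intro T
  induction T with
  | nil =>
    intro bd _ _ _ hdisj
    rcases hdisj with rfl | ⟨q, hq, _⟩
    · rfl
    · exact absurd hq (List.not_mem_nil)
  | cons q T ih =>
    intro bd hsub hmin hbd hdisj
    have hq : q ∈ S := hsub q List.mem_cons_self
    have hc : pvScov S q.1 ≤ m := Hle q hq
    simp only [List.foldl_cons, pvStep]
    by_cases hupd : pvScov S q.1 > m ∨ (pvScov S q.1 = m ∧ q.1 < bd)
    · rcases hupd with h | ⟨hcm, hlt⟩
      · omega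
      · simp only [hcm, gt_iff_lt, lt_self_iff_false, hlt, and_true, true_or, if_true, hcm]
        apply ih q.1 (fun r hr => hsub r (List.mem_cons_of_mem _ hr))
          (fun r hr h => hmin r (List.mem_cons_of_mem _ hr) h)
          (hmin q List.mem_cons_self hcm)
        rcases hdisj with rfl | ⟨r, hr, hrm, hrs⟩
        · exfalso; have := hmin q List.mem_cons_self hcm; omega
        · rcases List.mem_cons.mp hr with rfl | hr'
          · left; exact hrs
          · right; exact ⟨r, hr', hrm, hrs⟩
    · simp only [if_neg hupd]
      apply ih bd (fun r hr => hsub r (List.mem_cons_of_mem _ hr))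
        (fun r hr h => hmin r (List.mem_cons_of_mem _ hr) h) hbd
      rcases hdisj with rfl | ⟨r, hr, hrm, hrs⟩
      · left; rfl
      · rcases List.mem_cons.mp hr with rfl | hr'
        · left
          push_neg at hupd
          have h2 := hupd.2 hrm
          have := hmin r List.mem_cons_self hrm
          omega
        · right; exact ⟨r, hr', hrm, hrs⟩

-- while below the maximum, the fold eventually stores (m, s')
lemma pvFoldB_main (S : List (Int × Int)) (m s' : Int)
    (Hle : ∀ q ∈ S, pvScov S q.1 ≤ m) :
    ∀ (T : List (Int × Int)) (bc bd : Int), (∀ q ∈ T, q ∈ S) → bc < m →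
      (∀ q ∈ T, pvScov S q.1 = m → s' ≤ q.1) →
      (∃ q ∈ T, pvScov S q.1 = m ∧ q.1 = s') →
      (T.foldl (pvStep S) (bc, bd)).2 = s' := by
  intro T
  induction T with
  | nil =>
    intro bc bd _ _ _ hex
    obtain ⟨q, hq, _⟩ := hex
    exact absurd hq (List.not_mem_nil)
  | cons q T ih =>
    intro bc bd hsub hbc hmin hex
    have hq : q ∈ S := hsub q List.mem_cons_self
    have hc : pvScov S q.1 ≤ m := Hle q hq
    simp only [List.foldl_cons, pvStep]
    by_cases hcm : pvScov S q.1 = m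
    · have hupd : pvScov S q.1 > bc ∨ (pvScov S q.1 = bc ∧ q.1 < bd) := by left; omega
      simp only [if_pos hupd]
      rw [hcm]
      apply pvFoldB_min S m s' Hle T q.1
        (fun r hr => hsub r (List.mem_cons_of_mem _ hr))
        (fun r hr h => hmin r (List.mem_cons_of_mem _ hr) h)
        (hmin q List.mem_cons_self hcm)
      rcases hex with ⟨r, hr, hrm, hrs⟩
      rcases List.mem_cons.mp hr with rfl | hr'
      · left; exact hrs
      · right; exact ⟨r, hr', hrm, hrs⟩
    · have hex' : ∃ r ∈ T, pvScov S r.1 = m ∧ r.1 = s' := by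
        rcases hex with ⟨r, hr, hrm, hrs⟩
        rcases List.mem_cons.mp hr with rfl | hr'
        · exact absurd hrm hcm
        · exact ⟨r, hr', hrm, hrs⟩
      by_cases hupd : pvScov S q.1 > bc ∨ (pvScov S q.1 = bc ∧ q.1 < bd)
      · simp only [if_pos hupd]
        exact ih (pvScov S q.1) q.1 (fun r hr => hsub r (List.mem_cons_of_mem _ hr))
          (by omega) (fun r hr h => hmin r (List.mem_cons_of_mem _ hr) h) hex'
      · simp only [if_neg hupd]
        exact ih bc bd (fun r hr => hsub r (List.mem_cons_of_mem _ hr))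
          hbc (fun r hr h => hmin r (List.mem_cons_of_mem _ hr) h) hex'

-- if no candidate has positive coverage, the state never changes
lemma pvFoldB_zero (S : List (Int × Int))
    (Hle : ∀ q ∈ S, pvScov S q.1 ≤ 0) (Hnn : ∀ q ∈ S, 0 ≤ q.1) :
    ∀ (T : List (Int × Int)), (∀ q ∈ T, q ∈ S) →
      T.foldl (pvStep S) (0, 0) = (0, 0) := by
  intro T
  induction T with
  | nil => intro _; rfl
  | cons q T ih =>
    intro hsub
    have hq : q ∈ S := hsub q List.mem_cons_self
    simp only [List.foldl_cons, pvStep]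
    have hupd : ¬ (pvScov S q.1 > (0 : Int) ∨ (pvScov S q.1 = (0 : Int) ∧ q.1 < (0 : Int))) := by
      have h1 := Hle q hq
      have h2 := Hnn q hq
      push_neg
      constructor
      · omega
      · intro _; omega
    simp only [if_neg hupd]
    exact ih (fun r hr => hsub r (List.mem_cons_of_mem _ hr))

-- ===== VERDICT (by name: the statement is the Claim_ definition above) =====
theorem part_two_spec : Claim_equal_part_two := by
  intro bots _
  show part_two bots = part_two_alt bots
  cases bots with
  | nil => rfl
  | cons b bs =>
    set bots := b :: bs with hbots
    set es : List (Int × Int) :=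
      PySem.List.sorted2 (pvEventsA bots) (fun p => p.1) (fun p => p.2) with hes
    set S : List (Int × Int) := pvSegs bots with hS
    have hperm : es.Perm (pvEv bots) := by
      rw [hes, ← pvEventsA_eq]
      exact PySem.List.sorted2_perm _ _ _ _
    have hpw : es.Pairwise pvPL := pvSorted_pairwise _
    have hevs : ∀ p, pvEvsum es p = pvScov S p := fun p =>
      (pvEvsum_perm hperm p).trans (pvEvsum_ev_scov bots p)
    have hmem1 : ∀ s, ((s, (1 : Int)) ∈ es) ↔ ∃ q ∈ S, q.1 = s := fun s =>
      hperm.mem_iff.trans (pvMem_ev_one bots s)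
    have hpm : ∀ e ∈ es, e.2 = 1 ∨ e.2 = -1 := fun e he =>
      pvEv_pm bots e (hperm.subset he)
    have hA : part_two bots = (match pvMne 0 es with
        | none => (0 : Int)
        | some m => if m > 0 then pvFk 0 m es else 0) := by
      rw [show part_two bots = pvSweep 0 0 0 es from rfl, pvSweep_eq]
    have hne : es ≠ [] := by
      intro h
      have hmem : (pvLo b, (1 : Int)) ∈ es :=
        hperm.mem_iff.mpr (by simp [pvEv, hbots])
      rw [h] at hmem
      exact absurd hmem (List.not_mem_nil)
    obtain ⟨e0, es', hes'⟩ : ∃ e0 es', es = e0 :: es' := by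
      cases h : es with
      | nil => exact absurd h hne
      | cons e0 es' => exact ⟨e0, es', rfl⟩
    obtain ⟨m, hm⟩ : ∃ m, pvMne 0 es = some m := by rw [hes']; exact ⟨_, rfl⟩
    have hub : ∀ q ∈ S, pvScov S q.1 ≤ m := by
      intro q hq
      have h := pvMne_ge_evsum es 0 m q.1 hpw hm
        ⟨(q.1, 1), (hmem1 q.1).mpr ⟨q, hq, rfl⟩, le_refl _⟩
      rw [hevs] at h
      omega
    rw [hA, hm, pvAlt_eq]
    by_cases hm0 : m ≤ 0
    · have : ¬ (m > (0 : Int)) := by omega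
      simp only [this, if_false]
      rw [pvFoldB_zero S (fun q hq => le_trans (hub q hq) hm0)
        (pvSegs_lo_nonneg bots) S (fun _ h => h)]
    · have hm0' : (0 : Int) < m := by omega
      simp only [gt_iff_lt, hm0', if_true]
      obtain ⟨hmem, hsum, hmin⟩ := pvFk_spec es 0 m hpw hpm hm hm0'
      obtain ⟨q0, hq0, hq0eq⟩ := (hmem1 (pvFk 0 m es)).mp hmem
      have hq0cov : pvScov S (pvFk 0 m es) = m := by
        rw [← hevs]; omega
      have hminS : ∀ q ∈ S, pvScov S q.1 = m → pvFk 0 m es ≤ q.1 := by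
        intro q hq hcov
        apply hmin q.1 ⟨(q.1, 1), (hmem1 q.1).mpr ⟨q, hq, rfl⟩, le_refl _⟩
        rw [hevs]
        omega
      rw [pvFoldB_main S m (pvFk 0 m es) hub S 0 0 (fun _ h => h) hm0' hminS
        ⟨q0, hq0, by rw [hq0eq]; exact ⟨hq0cov, rfl⟩⟩]
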